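-- pv_equiv track=rewrite | github.com/mutont/mahj-former | util.py | lst_to_str
-- ===== SOURCE A (Python) =====
-- def lst_to_str(lst):
--     txt = ""
--     suit = None
--     for i in lst:
--         s,n = i[0],int(i[1])
--         if s == suit:
--             txt += str(n)
--         else:
--             suit = s
--             txt += str(s)+str(n)
--
--     return txt
-- ===== SOURCE B (Python) =====
-- def lst_to_str(lst):
--     # Explicit run-grouping: emit each suit character once per maximal run,
--     # then the digits of the run; join the pieces at the end.
--     out = []
--     i = 0
--     n = len(lst)
--     while i < n:
--         suit = lst[i][0]
--         out.append(suit)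
--         while i < n and lst[i][0] == suit:
--             out.append(str(int(lst[i][1])))
--             i += 1
--     return "".join(out)
-- ===== Notes on version B (the rewrite author's own statement) =====
-- stated objective: alternative
-- what changed: B groups the list into maximal runs of equal suit with an explicit nested loop and joins collected pieces, instead of A's single pass tracking a 'suit' sentinel and repeated string concatenation.
import Mathlib
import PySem

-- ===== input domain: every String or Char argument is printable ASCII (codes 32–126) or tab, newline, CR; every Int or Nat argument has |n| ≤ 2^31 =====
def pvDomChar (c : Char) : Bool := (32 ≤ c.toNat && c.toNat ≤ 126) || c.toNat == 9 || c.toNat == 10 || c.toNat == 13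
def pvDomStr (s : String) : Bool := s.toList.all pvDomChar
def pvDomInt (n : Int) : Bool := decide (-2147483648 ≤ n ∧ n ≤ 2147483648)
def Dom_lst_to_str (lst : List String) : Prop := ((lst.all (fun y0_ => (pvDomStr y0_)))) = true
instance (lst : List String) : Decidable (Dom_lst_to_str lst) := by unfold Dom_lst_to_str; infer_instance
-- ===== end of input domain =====

-- B replaces A's suit-sentinel single pass by explicit grouping into maximal runs of equal suit (alternative decomposition, same cost).


-- ===== PORT A =====
-- shared helper: transliteration of `str(int(t[1]))` (both Pythons compute it verbatim);
-- [] marks the raising cases (t[1] missing / not an int literal), excluded by Pre_.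
def tileDigit (t : String) : List Char :=
  match PySem.Str.pyGet? t 1 with
  | some c =>
    match PySem.Int.ofStr? (String.ofList [c]) with
    | some n => PySem.Int.toChars n
    | none => []
  | none => []

-- the `for i in lst` loop with state (txt, suit); on a raising element it stops (excluded by Pre_)
def lstToStrGo : List String → List Char → Option Char → List Char
  | [], txt, _ => txt
  | t :: rest, txt, suit =>
    match PySem.Str.pyGet? t 0 with
    | none => txt
    | some s =>
      if some s = suit then lstToStrGo rest (txt ++ tileDigit t) suit
      else lstToStrGo rest (txt ++ [s] ++ tileDigit t) (some s)

def lst_to_str (lst : List String) : String := String.ofList (lstToStrGo lst [] none)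

-- ===== PORT B =====
-- outer while loop: one step per maximal run of equal suit; inner while = takeWhile/dropWhile
def lstToStrRuns : List String → List Char
  | [] => []
  | t :: rest =>
    match PySem.Str.pyGet? t 0 with
    | none => []
    | some s =>
      s :: (tileDigit t ++
        (rest.takeWhile (fun u => PySem.Str.pyGet? u 0 == some s)).flatMap tileDigit ++
        lstToStrRuns (rest.dropWhile (fun u => PySem.Str.pyGet? u 0 == some s)))
  termination_by l => l.length
  decreasing_by
    simpa using Nat.lt_succ_of_le (List.Sublist.length_le (List.dropWhile_sublist _))

def lst_to_str_alt (lst : List String) : String := String.ofList (lstToStrRuns lst)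

-- ===== PRECONDITION & SPEC =====
-- Pre_ excludes exactly the inputs where A raises: an element shorter than 2 chars
-- (IndexError on t[0]/t[1]) or whose second char is not a digit (ValueError in int(t[1])).
def Pre_lst_to_str (lst : List String) : Prop :=
  ∀ t ∈ lst, 2 ≤ t.toList.length ∧ (t.toList.getD 1 ' ').isDigit = true
instance (lst : List String) : Decidable (Pre_lst_to_str lst) := by unfold Pre_lst_to_str; infer_instance
def pvWitness_lst_to_str : List String := (["m1", "m2", "p3", "p3", "m9"])

def Spec_lst_to_str (lst : List String) (out : String) : Prop := out = lst_to_str_alt lst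
instance (lst : List String) (out : String) : Decidable (Spec_lst_to_str lst out) := by unfold Spec_lst_to_str; infer_instance

-- ===== CLAIM (what is proved, stated in full; the proofs are below) =====
def Claim_equal_lst_to_str : Prop := ∀ (lst : List String), Dom_lst_to_str lst → Pre_lst_to_str lst → Spec_lst_to_str lst (lst_to_str lst)

-- ===== LEMMAS AND PROOFS =====

theorem lstToStrGo_acc (lst : List String) : ∀ (txt : List Char) (suit : Option Char),
    lstToStrGo lst txt suit = txt ++ lstToStrGo lst [] suit := by
  induction lst with
  | nil => simp [lstToStrGo]
  | cons t rest ih =>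
    intro txt suit
    cases h : PySem.List.pyGet? t.toList 0 with
    | none => simp [lstToStrGo, h]
    | some s =>
      simp only [lstToStrGo, pysem, h]
      by_cases hs : some s = suit
      · rw [if_pos hs, if_pos hs, ih (txt ++ tileDigit t), ih ([] ++ tileDigit t)]; simp
      · rw [if_neg hs, if_neg hs, ih (txt ++ [s] ++ tileDigit t), ih ([] ++ [s] ++ tileDigit t)]; simp

theorem pre_head (t : String) (h2 : 2 ≤ t.toList.length) :
    ∃ s, PySem.Str.pyGet? t 0 = some s := by
  refine ⟨t.toList[0]'(by omega), ?_⟩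
  simp [PySem.List.pyGet?_zero, List.getElem?_eq_getElem (show 0 < t.toList.length by omega)]

theorem lstToStrGo_run (rest : List String) (s : Char)
    (hp : ∀ t ∈ rest, 2 ≤ t.toList.length ∧ (t.toList.getD 1 ' ').isDigit = true) :
    lstToStrGo rest [] (some s) =
      (rest.takeWhile (fun u => PySem.Str.pyGet? u 0 == some s)).flatMap tileDigit ++
      lstToStrGo (rest.dropWhile (fun u => PySem.Str.pyGet? u 0 == some s)) [] (some s) := by
  induction rest with
  | nil => simp
  | cons t rest ih =>
    obtain ⟨c, hc⟩ := pre_head t (hp t (by simp)).1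
    have hc' : PySem.List.pyGet? t.toList 0 = some c := by simpa using hc
    by_cases hcs : c = s
    · subst hcs
      rw [List.takeWhile_cons_of_pos (by simp [hc']), List.dropWhile_cons_of_pos (by simp [hc'])]
      simp only [lstToStrGo, pysem, hc', List.flatMap_cons]
      rw [lstToStrGo_acc rest ([] ++ tileDigit t), ih (fun u hu => hp u (by simp [hu]))]
      simp [PySem.List.pyGet?_zero]
    · rw [List.takeWhile_cons_of_neg (by simp [hc', hcs]), List.dropWhile_cons_of_neg (by simp [hc', hcs])]
      simp

theorem lstToStrGo_eq_runs : ∀ (n : Nat) (lst : List String), lst.length ≤ n →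
    (∀ t ∈ lst, 2 ≤ t.toList.length ∧ (t.toList.getD 1 ' ').isDigit = true) →
    ∀ (suit : Option Char), (∀ t c, lst.head? = some t → PySem.Str.pyGet? t 0 = some c → some c ≠ suit) →
    lstToStrGo lst [] suit = lstToStrRuns lst := by
  intro n
  induction n with
  | zero =>
    intro lst hlen _ suit _
    have : lst = [] := List.eq_nil_of_length_eq_zero (Nat.le_zero.mp hlen)
    subst this; simp [lstToStrGo, lstToStrRuns]
  | succ n ih =>
    intro lst hlen hp suit hsuit
    cases lst with
    | nil => simp [lstToStrGo, lstToStrRuns]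
    | cons t rest =>
      obtain ⟨s, hs⟩ := pre_head t (hp t (by simp)).1
      have hne : some s ≠ suit := hsuit t s rfl hs
      simp only [lstToStrGo, lstToStrRuns, hs, if_neg hne]
      rw [lstToStrGo_acc, lstToStrGo_run rest s (fun u hu => hp u (by simp [hu]))]
      set rest' := rest.dropWhile (fun u => PySem.Str.pyGet? u 0 == some s) with hrest'
      have hrun : lstToStrGo rest' [] (some s) = lstToStrRuns rest' := by
        apply ih rest'
        · exact Nat.le_of_lt_succ (Nat.lt_of_le_of_lt (List.Sublist.length_le (List.dropWhile_sublist _)) (by simpa using hlen))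
        · exact fun u hu => hp u (by simp [List.Sublist.mem (hrest' ▸ hu) (List.dropWhile_sublist _)])
        · intro u c hu hc
          have hpred : (fun u => PySem.Str.pyGet? u 0 == some s) u = false := by
            have := List.head?_dropWhile_not (fun u => PySem.Str.pyGet? u 0 == some s) rest
            rw [← hrest', hu] at this
            simpa using this
          simp only [hc] at hpred
          simpa using hpred
      rw [hrun]; simp

-- ===== VERDICT (by name: the statement is the Claim_ definition above) =====
theorem lst_to_str_spec : Claim_equal_lst_to_str := by
  intro lst _ hpre
  unfold Spec_lst_to_str lst_to_str lst_to_str_alt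
  rw [lstToStrGo_eq_runs lst.length lst le_rfl hpre none (by intro _ _ _ _; simp)]
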